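-- pv_equiv track=rewrite | github.com/vaibhavwantstocode/IRE_ASSIGNMENT1 | src/query_processor.py | daat_boolean
-- ===== SOURCE A (Python) =====
-- from typing import List, Set, Dict, Tuple
--
-- def daat_boolean(postings_lists: List[Set[str]], operation: str = 'AND') -> Set[str]:
--     """
--     Document-at-a-Time processing for Boolean queries.
--     More efficient than TAAT when posting lists are sorted.
--
--     Args:
--         postings_lists: List of sets containing doc_ids for each query term
--         operation: 'AND' or 'OR'
--
--     Returns:
--         Set of doc_ids that satisfy the Boolean query
--     """
--     if not postings_lists:
--         return set()
--
--     if operation == 'AND':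
--         # Convert to sorted lists for efficient intersection
--         sorted_lists = [sorted(list(postings)) for postings in postings_lists]
--
--         if not all(sorted_lists):
--             return set()
--
--         # Use multi-way merge with AND logic
--         result = set()
--         pointers = [0] * len(sorted_lists)
--
--         while all(pointers[i] < len(sorted_lists[i]) for i in range(len(sorted_lists))):
--             # Get current doc_ids at each pointer
--             current_docs = [sorted_lists[i][pointers[i]] for i in range(len(sorted_lists))]
--
--             # If all doc_ids match, we have an AND match
--             if len(set(current_docs)) == 1:
--                 result.add(current_docs[0])
--                 # Advance all pointers
--                 for i in range(len(pointers)):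
--                     pointers[i] += 1
--             else:
--                 # Advance pointer(s) pointing to smallest doc_id
--                 min_doc = min(current_docs)
--                 for i in range(len(pointers)):
--                     if current_docs[i] == min_doc:
--                         pointers[i] += 1
--
--         return result
--
--     elif operation == 'OR':
--         # Simple union for OR
--         result = set()
--         for postings in postings_lists:
--             result = result.union(postings)
--         return result
--
--     return set()
-- ===== SOURCE B (Python) =====
-- def daat_boolean(postings_lists, operation='AND'):
--     if not postings_lists:
--         return set()
--     if operation == 'AND':
--         # probe: walk the first posting set in sorted order, keep docs present in all others
--         return {d for d in sorted(postings_lists[0])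
--                 if all(d in p for p in postings_lists[1:])}
--     if operation == 'OR':
--         return {d for p in postings_lists for d in p}
--     return set()
-- ===== Notes on version B (the rewrite author's own statement) =====
-- stated objective: simpler
-- what changed: A's AND multi-way pointer merge over sorted copies of every posting set is replaced by a single filter: walk the first posting set in sorted order and keep each doc that is a member of all remaining sets; OR becomes one flattening set comprehension instead of a fold of unions.
import Mathlib
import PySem

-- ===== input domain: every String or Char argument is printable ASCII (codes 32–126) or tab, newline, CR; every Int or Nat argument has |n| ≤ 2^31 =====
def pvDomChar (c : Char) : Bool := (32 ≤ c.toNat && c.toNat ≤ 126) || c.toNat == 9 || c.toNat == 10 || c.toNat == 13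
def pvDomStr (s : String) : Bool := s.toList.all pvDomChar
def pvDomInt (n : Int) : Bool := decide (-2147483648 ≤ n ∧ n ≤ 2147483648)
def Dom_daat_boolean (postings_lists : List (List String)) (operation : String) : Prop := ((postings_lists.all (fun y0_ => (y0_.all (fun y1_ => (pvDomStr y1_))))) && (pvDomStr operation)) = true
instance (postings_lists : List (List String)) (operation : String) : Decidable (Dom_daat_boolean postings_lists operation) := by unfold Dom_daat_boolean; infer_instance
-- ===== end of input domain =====

-- B replaces A's multi-way sorted-pointer AND merge by a single membership filter over the first
-- posting set (and A's OR union fold by one flattening set comprehension): simpler, same results.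


-- ===== PORT A =====
-- termination lemmas for the while-loop: the total number of unread postings drops each iteration
theorem pvSumLtAll (zs : List (List String × Nat)) (hne : zs ≠ [])
    (hall : ∀ lp ∈ zs, lp.2 < lp.1.length) :
    (zs.map (fun lp => lp.1.length - (lp.2 + 1))).sum
      < (zs.map (fun lp => lp.1.length - lp.2)).sum := by
  refine List.sum_lt_sum _ _ (fun lp h => by omega) ?_
  obtain ⟨lp, h⟩ := List.exists_mem_of_ne_nil zs hne
  exact ⟨lp, h, by have := hall lp h; omega⟩

theorem pvSumLtMin (zs : List (List String × Nat)) (m : String)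
    (hall : ∀ lp ∈ zs, lp.2 < lp.1.length)
    (hm : ∃ lp ∈ zs, lp.1.getD lp.2 "" = m) :
    (zs.map (fun lp => (if lp.1.getD lp.2 "" = m then (lp.1, lp.2 + 1) else lp).1.length
        - (if lp.1.getD lp.2 "" = m then (lp.1, lp.2 + 1) else lp).2)).sum
      < (zs.map (fun lp => lp.1.length - lp.2)).sum := by
  refine List.sum_lt_sum _ _ (fun lp h => ?_) ?_
  · by_cases hcc : lp.1.getD lp.2 "" = m
    · simp only [if_pos hcc]; omega
    · simp only [if_neg hcc]; exact le_refl _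
  · obtain ⟨lp, h, hcc⟩ := hm
    refine ⟨lp, h, ?_⟩
    have := hall lp h
    simp only [if_pos hcc]; omega

-- the while-loop of A's AND branch; zs pairs each sorted list with its pointer
def pvAndLoop (zs : List (List String × Nat)) (result : PySem.Set String) : PySem.Set String :=
  if hc : zs.all (fun lp => decide (lp.2 < lp.1.length)) then
    have hall : ∀ lp ∈ zs, lp.2 < lp.1.length := by
      intro lp h; have := (List.all_eq_true.mp hc) lp h; simpa using this
    -- current doc_ids at each pointer
    let current := zs.map (fun lp => lp.1.getD lp.2 "")
    if h1 : (PySem.Set.ofList current).length = 1 then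
      -- all current doc_ids match: record the doc and advance every pointer
      pvAndLoop (zs.map (fun lp => (lp.1, lp.2 + 1))) (PySem.Set.add result (current.getD 0 ""))
    else
      -- advance the pointers sitting at the smallest current doc_id; 'none' is Python's ValueError
      -- on min([]), unreachable because A only calls the loop with a nonempty list of lists
      match hmin : PySem.List.min? current (fun x => x) with
      | some m => pvAndLoop (zs.map (fun lp => if lp.1.getD lp.2 "" = m then (lp.1, lp.2 + 1) else lp)) result
      | none => result
  else result
termination_by (zs.map (fun lp => lp.1.length - lp.2)).sum
decreasing_by
  · have hne : zs ≠ [] := by rintro rfl; simp [current, PySem.Set.ofList] at h1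
    rw [List.map_map]
    simp only [Function.comp_def]
    rw [List.attach_map_val (l := zs) (f := fun lp => lp.1.length - (lp.2 + 1))]
    exact pvSumLtAll zs hne hall
  · have hmem : ∃ lp ∈ zs, lp.1.getD lp.2 "" = m := by
      have hmm := PySem.List.min?_mem hmin
      simp only [current, List.mem_map] at hmm
      obtain ⟨lp, hlp, he⟩ := hmm
      first
        | exact ⟨lp, hlp, he⟩
        | exact ⟨lp.val, lp.property, he⟩
    rw [List.map_map]
    simp only [Function.comp_def, dite_eq_ite]
    rw [List.attach_map_val (l := zs) (f := fun lp => (if lp.1.getD lp.2 "" = m then (lp.1, lp.2 + 1) else lp).1.length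
        - (if lp.1.getD lp.2 "" = m then (lp.1, lp.2 + 1) else lp).2)]
    exact pvSumLtMin zs m hall hmem

def daat_boolean (postings_lists : List (List String)) (operation : String) : List String :=
  if postings_lists = [] then []
  else if operation = "AND" then
    let sorted_lists := postings_lists.map (fun postings => PySem.List.sorted postings (fun x => x) false)
    if sorted_lists.all (fun l => !l.isEmpty) then
      pvAndLoop (sorted_lists.map (fun l => (l, 0))) PySem.Set.empty
    else []
  else if operation = "OR" then
    postings_lists.foldl (fun result postings => PySem.Set.union result postings) PySem.Set.empty
  else []

-- ===== PORT B =====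
def daat_boolean_alt (postings_lists : List (List String)) (operation : String) : List String :=
  if postings_lists = [] then []
  else if operation = "AND" then
    PySem.Set.ofList
      ((PySem.List.sorted (postings_lists.headD []) (fun x => x) false).filter
        (fun d => (postings_lists.drop 1).all (fun p => p.contains d)))
  else if operation = "OR" then
    PySem.Set.ofList postings_lists.flatten
  else []

-- ===== PRECONDITION & SPEC =====
-- Pre_ only states the encoding of A's set-typed argument: each inner list is the list of DISTINCT
-- elements of a Python set (every actual Python input satisfies this, since Python hands A sets).
def Pre_daat_boolean (postings_lists : List (List String)) (operation : String) : Prop :=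
  ∀ l ∈ postings_lists, l.Nodup
instance (postings_lists : List (List String)) (operation : String) : Decidable (Pre_daat_boolean postings_lists operation) := by unfold Pre_daat_boolean; infer_instance
def pvWitness_daat_boolean : List (List String) × String := ([["b", "a"], ["a", "c"]], "AND")

def Spec_daat_boolean (postings_lists : List (List String)) (operation : String) (out : List String) : Prop := out = daat_boolean_alt postings_lists operation
instance (postings_lists : List (List String)) (operation : String) (out : List String) : Decidable (Spec_daat_boolean postings_lists operation out) := by unfold Spec_daat_boolean; infer_instance

-- ===== CLAIM (what is proved, stated in full; the proofs are below) =====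
def Claim_equal_daat_boolean : Prop := ∀ (postings_lists : List (List String)) (operation : String), Dom_daat_boolean postings_lists operation → Pre_daat_boolean postings_lists operation → Spec_daat_boolean postings_lists operation (daat_boolean postings_lists operation)

-- ===== LEMMAS AND PROOFS =====

-- the sorted-order intersection both AND branches compute: the elements of the first list that
-- are members of every other list
def pvCommon : List (List String) → List String
  | [] => []
  | l0 :: rest => l0.filter (fun d => rest.all (fun l => l.contains d))

theorem pvAllCongrMem {α : Type} (l : List α) (f g : α → Bool) (h : ∀ x ∈ l, f x = g x) :
    l.all f = l.all g := by
  induction l with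
  | nil => rfl
  | cons a t ih =>
    simp only [List.all_cons, h a (List.mem_cons_self), ih (fun x hx => h x (List.mem_cons_of_mem a hx))]

theorem pvCommon_of_nil_mem (ls : List (List String)) (h : [] ∈ ls) : pvCommon ls = [] := by
  cases ls with
  | nil => rfl
  | cons l0 rest =>
    rcases List.mem_cons.mp h with h0 | h0
    · rw [← h0]; rfl
    · show List.filter _ _ = []
      rw [List.filter_eq_nil_iff]
      intro d _ hd
      have := List.all_eq_true.mp hd [] h0
      simp at this

theorem pvCommon_mem_head (ls : List (List String)) (d : String) (h : d ∈ pvCommon ls) :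
    d ∈ ls.headD [] := by
  cases ls with
  | nil => simp [pvCommon] at h
  | cons l0 rest =>
    simp only [pvCommon] at h
    simpa using List.mem_of_mem_filter h

theorem pvHead_le_of_sorted (l : List String) (h : l.Pairwise (· < ·)) (x : String) (hx : x ∈ l) :
    l.headD "" ≤ x := by
  cases l with
  | nil => simp at hx
  | cons a t =>
    rcases List.mem_cons.mp hx with rfl | hx
    · exact le_refl _
    · exact le_of_lt ((List.pairwise_cons.mp h).1 x hx)

theorem pvNotMem_of_lt_head (l : List String) (m : String) (h : l.Pairwise (· < ·))
    (hlt : m < l.headD "") : m ∉ l := fun hm => absurd (pvHead_le_of_sorted l h m hm) (not_le.mpr hlt)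

theorem pvContains_drop_one (l : List String) (m d : String) (hl : l.headD "" = m) (hne : l ≠ [])
    (hd : d ≠ m) : (l.drop 1).contains d = l.contains d := by
  cases l with
  | nil => exact absurd rfl hne
  | cons a t =>
    have : a = m := by simpa using hl
    subst this
    simp [hd]

theorem pvAllMapCongr (l : List (List String)) (F : List String -> List String) (d : String)
    (h : ∀ x ∈ l, (F x).contains d = x.contains d) :
    ((l.map F).all (fun y => y.contains d)) = l.all (fun y => y.contains d) := by
  rw [List.all_map]
  exact pvAllCongrMem l _ _ (fun x hx => by simp only [Function.comp_apply]; exact h x hx)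

theorem pvCommon_cons_all (ls : List (List String)) (m : String) (hne : ls ≠ [])
    (hh : ∀ l ∈ ls, l.headD "" = m ∧ l ≠ [])
    (hs : ∀ l ∈ ls, l.Pairwise (· < ·)) :
    pvCommon ls = m :: pvCommon (ls.map (fun l => l.drop 1)) := by
  cases ls with
  | nil => exact absurd rfl hne
  | cons l0 rest =>
    obtain ⟨hl0, hl0ne⟩ := hh l0 (List.mem_cons_self)
    cases l0 with
    | nil => exact absurd rfl hl0ne
    | cons a t0 =>
      have ha : a = m := by simpa using hl0
      subst ha
      have hPa : ((fun d => rest.all (fun l => l.contains d)) a) = true := by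
        show rest.all (fun l => l.contains a) = true
        rw [List.all_eq_true]
        intro l hl
        obtain ⟨hlh, hlne⟩ := hh l (List.mem_cons_of_mem _ hl)
        cases l with
        | nil => exact absurd rfl hlne
        | cons b t =>
          have : b = a := by simpa using hlh
          subst this
          simp
      simp only [pvCommon, List.map_cons, List.drop_succ_cons, List.drop_zero]
      rw [List.filter_cons, if_pos hPa]
      congr 1
      refine List.filter_congr (fun d hd => ?_)
      have hdm : d ≠ a := by
        have := (List.pairwise_cons.mp (hs _ (List.mem_cons_self))).1 d hd
        exact fun h => absurd (h ▸ this) (lt_irrefl _)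
      refine (pvAllMapCongr rest _ d (fun l hl => ?_)).symm
      obtain ⟨hlh, hlne⟩ := hh l (List.mem_cons_of_mem _ hl)
      exact pvContains_drop_one l a d hlh hlne hdm

theorem pvCommon_min (ls : List (List String)) (m : String)
    (hne : ∀ l ∈ ls, l ≠ [])
    (hs : ∀ l ∈ ls, l.Pairwise (· < ·))
    (hmin : ∀ l ∈ ls, m ≤ l.headD "")
    (hex : ∃ l ∈ ls, l.headD "" ≠ m) :
    pvCommon ls = pvCommon (ls.map (fun l => if l.headD "" = m then l.drop 1 else l)) := by
  have hnotmem : ∀ l ∈ ls, l.headD "" ≠ m → m ∉ l := by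
    intro l hl hlh
    exact pvNotMem_of_lt_head l m (hs l hl) (lt_of_le_of_ne (hmin l hl) (Ne.symm hlh))
  have hcontains : ∀ l ∈ ls, ∀ d, d ≠ m →
      ((if l.headD "" = m then l.drop 1 else l).contains d = l.contains d) := by
    intro l hl d hd
    by_cases hc : l.headD "" = m
    · rw [if_pos hc]; exact pvContains_drop_one l m d hc (hne l hl) hd
    · rw [if_neg hc]
  cases ls with
  | nil => rfl
  | cons l0 rest =>
    simp only [pvCommon, List.map_cons]
    by_cases hc0 : l0.headD "" = m
    · -- the first list starts at m, but m is missing from some other list, so m is not kept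
      rw [if_pos hc0]
      cases l0 with
      | nil => exact absurd rfl (hne _ (List.mem_cons_self))
      | cons a t0 =>
        have ha : a = m := by simpa using hc0
        subst ha
        have hPa : ((fun d => rest.all (fun l => l.contains d)) a) = false := by
          show rest.all (fun l => l.contains a) = false
          obtain ⟨lw, hlw, hlwh⟩ := hex
          rcases List.mem_cons.mp hlw with rfl | hlw
          · exact absurd hc0 hlwh
          · have hnm : a ∉ lw := hnotmem lw (List.mem_cons_of_mem _ hlw) hlwh
            rw [List.all_eq_false]
            refine ⟨lw, hlw, ?_⟩
            simpa using hnm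
        rw [List.filter_cons, if_neg (by simp only [hPa]; decide), List.drop_succ_cons, List.drop_zero]
        refine List.filter_congr (fun d hd => ?_)
        have hdm : d ≠ a := by
          have := (List.pairwise_cons.mp (hs _ (List.mem_cons_self))).1 d hd
          exact fun h => absurd (h ▸ this) (lt_irrefl _)
        refine (pvAllMapCongr rest _ d (fun l hl => ?_)).symm
        exact hcontains l (List.mem_cons_of_mem _ hl) d hdm
    · rw [if_neg hc0]
      refine List.filter_congr (fun d hd => ?_)
      have hdm : d ≠ m := by
        intro h
        exact (hnotmem l0 (List.mem_cons_self) hc0) (h ▸ hd)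
      refine (pvAllMapCongr rest _ d (fun l hl => ?_)).symm
      exact hcontains l (List.mem_cons_of_mem _ hl) d hdm

theorem pvDropHeadD (l : List String) (p : Nat) : (l.drop p).headD "" = l.getD p "" := by
  rw [List.headD_eq_head?, List.head?_drop, List.getD_eq_getElem?_getD]

-- a one-element set means every current doc_id equals current_docs[0]
theorem pvAllEq (cur : List String) (h1 : (PySem.Set.ofList cur).length = 1) :
    ∀ c ∈ cur, c = cur.getD 0 "" := by
  obtain ⟨a, ha⟩ := List.length_eq_one_iff.mp h1
  have hmem : ∀ c ∈ cur, c = a := by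
    intro c hc
    have : c ∈ PySem.Set.ofList cur := (PySem.Set.mem_ofList cur c).mpr hc
    rw [ha] at this; simpa using this
  intro c hc
  cases cur with
  | nil => simp at hc
  | cons c0 t =>
    have h0 : c0 = a := hmem c0 (List.mem_cons_self)
    rw [hmem c hc]; simp [h0]

theorem pvExistsNe (cur : List String) (hne : cur ≠ []) (h1 : (PySem.Set.ofList cur).length ≠ 1)
    (m : String) : ∃ c ∈ cur, c ≠ m := by
  by_contra h
  push_neg at h
  apply h1
  have hof : PySem.Set.ofList cur = [m] := by
    have hnd := PySem.Set.nodup_ofList cur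
    have hm : ∀ x ∈ PySem.Set.ofList cur, x = m := by
      intro x hx
      exact h x ((PySem.Set.mem_ofList cur x).mp hx)
    cases hcur : PySem.Set.ofList cur with
    | nil =>
      obtain ⟨c, hc⟩ := List.exists_mem_of_ne_nil cur hne
      have := (PySem.Set.mem_ofList cur c).mpr hc
      rw [hcur] at this; simp at this
    | cons b t =>
      rw [hcur] at hm hnd
      have hb : b = m := hm b (List.mem_cons_self)
      cases t with
      | nil => rw [hb]
      | cons b2 t2 =>
        have hb2 : b2 = m := hm b2 (List.mem_cons_of_mem _ (List.mem_cons_self))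
        rw [List.nodup_cons] at hnd
        exact absurd (by rw [hb, hb2]; exact List.mem_cons_self) hnd.1
  rw [hof]
  rfl

theorem pvAndLoop_spec (zs : List (List String × Nat)) (result : PySem.Set String)
    (hs : ∀ lp ∈ zs, (lp.1.drop lp.2).Pairwise (· < ·))
    (hres : ∀ d ∈ pvCommon (zs.map (fun lp => lp.1.drop lp.2)), d ∉ result) :
    pvAndLoop zs result = result ++ pvCommon (zs.map (fun lp => lp.1.drop lp.2)) := by
  suffices H : ∀ n zs result, (zs.map (fun lp : List String × Nat => lp.1.length - lp.2)).sum = n →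
      (∀ lp ∈ zs, (lp.1.drop lp.2).Pairwise (· < ·)) →
      (∀ d ∈ pvCommon (zs.map (fun lp => lp.1.drop lp.2)), d ∉ result) →
      pvAndLoop zs result = result ++ pvCommon (zs.map (fun lp => lp.1.drop lp.2)) by
    exact H _ zs result rfl hs hres
  intro n
  induction n using Nat.strong_induction_on with
  | _ n IH =>
    intro zs result hn hs hres
    rw [pvAndLoop.eq_def]
    by_cases hc : zs.all (fun lp => decide (lp.2 < lp.1.length))
    case neg =>
      rw [dif_neg hc]
      have : ∃ lp ∈ zs, ¬ lp.2 < lp.1.length := by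
        by_contra hcc
        push_neg at hcc
        exact hc (List.all_eq_true.mpr (fun lp h => by simpa using hcc lp h))
      obtain ⟨lp, hlp, hge⟩ := this
      have hnil : [] ∈ zs.map (fun lp => lp.1.drop lp.2) :=
        List.mem_map.mpr ⟨lp, hlp, List.drop_eq_nil_iff.mpr (by omega)⟩
      rw [pvCommon_of_nil_mem _ hnil, List.append_nil]
    case pos =>
      rw [dif_pos hc]
      have hall : ∀ lp ∈ zs, lp.2 < lp.1.length := by
        intro lp h; have := (List.all_eq_true.mp hc) lp h; simpa using this
      by_cases h1 : (PySem.Set.ofList (zs.map (fun lp => lp.1.getD lp.2 ""))).length = 1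
      case pos =>
        rw [dif_pos h1]
        -- every current doc_id equals m
        set m := (zs.map (fun lp => lp.1.getD lp.2 "")).getD 0 "" with hm
        have hcurne : zs ≠ [] := by
          rintro rfl; simp [PySem.Set.ofList] at h1
        have heq : ∀ lp ∈ zs, lp.1.getD lp.2 "" = m :=
          fun lp h => pvAllEq _ h1 _ (List.mem_map.mpr ⟨lp, h, rfl⟩)
        have hh : ∀ l ∈ zs.map (fun lp => lp.1.drop lp.2), l.headD "" = m ∧ l ≠ [] := by
          intro l hl
          obtain ⟨lp, hlp, rfl⟩ := List.mem_map.mp hl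
          refine ⟨by rw [pvDropHeadD]; exact heq lp hlp,
            fun hnil => by have := List.drop_eq_nil_iff.mp hnil; have := hall lp hlp; omega⟩
        have hcom : pvCommon (zs.map (fun lp => lp.1.drop lp.2)) =
            m :: pvCommon ((zs.map (fun lp => lp.1.drop lp.2)).map (fun l => l.drop 1)) :=
          pvCommon_cons_all _ m (by simpa using hcurne) hh
            (by intro l hl
                obtain ⟨lp, hlp, rfl⟩ := List.mem_map.mp hl
                exact hs lp hlp)
        have hfam : (zs.map (fun lp => lp.1.drop lp.2)).map (fun l => l.drop 1) =
            (zs.map (fun lp => (lp.1, lp.2 + 1))).map (fun lp => lp.1.drop lp.2) := by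
          rw [List.map_map, List.map_map]
          exact List.map_congr_left (fun lp _ => by simp)
        have hmnotin : m ∉ result := hres m (by rw [hcom]; exact List.mem_cons_self)
        have hadd : PySem.Set.add result m = result ++ [m] := PySem.Set.add_of_not_mem hmnotin
        have hmlt : ∀ d ∈ pvCommon ((zs.map (fun lp => lp.1.drop lp.2)).map (fun l => l.drop 1)),
            m < d := by
          intro d hd
          have hd0 := pvCommon_mem_head _ _ hd
          cases zs with
          | nil => exact absurd rfl hcurne
          | cons lp0 zt =>
            have hh0 := hh (lp0.1.drop lp0.2) (List.mem_map.mpr ⟨lp0, List.mem_cons_self, rfl⟩)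
            have hs0 := hs lp0 (List.mem_cons_self)
            cases hl0 : lp0.1.drop lp0.2 with
            | nil => exact absurd hl0 hh0.2
            | cons a t0 =>
              have ha : a = m := by have := hh0.1; rw [hl0] at this; simpa using this
              rw [hl0] at hs0
              simp only [List.map_cons, List.headD_cons, hl0] at hd0
              rw [List.drop_one, List.tail_cons] at hd0
              exact ha ▸ (List.pairwise_cons.mp hs0).1 d hd0
        have hrec := IH ((zs.map (fun lp => (lp.1, lp.2 + 1))).map
            (fun lp : List String × Nat => lp.1.length - lp.2)).sum
          (by rw [← hn, List.map_map]
              have := pvSumLtAll zs hcurne hall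
              simpa [Function.comp_def] using this)
          (zs.map (fun lp => (lp.1, lp.2 + 1))) (result ++ [m]) rfl
          (by intro lp hlp
              obtain ⟨lq, hlq, rfl⟩ := List.mem_map.mp hlp
              simp only
              have : lq.1.drop (lq.2 + 1) = (lq.1.drop lq.2).drop 1 := by simp [List.drop_drop]
              rw [this]
              exact List.Pairwise.sublist (List.drop_sublist 1 _) (hs lq hlq))
          (by intro d hd
              rw [← hfam] at hd
              have hdm : m < d := hmlt d hd
              have hdc : d ∈ pvCommon (zs.map (fun lp => lp.1.drop lp.2)) := by
                rw [hcom]; exact List.mem_cons_of_mem _ hd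
              simp only [List.mem_append, List.mem_singleton]
              rintro (h | rfl)
              · exact hres d hdc h
              · exact absurd hdm (lt_irrefl _))
        rw [hadd, hrec, ← hfam, hcom]
        simp
      case neg =>
        rw [dif_neg h1]
        cases hmin : PySem.List.min? (zs.map (fun lp => lp.1.getD lp.2 "")) (fun x => x) with
        | none =>
          have : zs.map (fun lp => lp.1.getD lp.2 "") = [] :=
            (PySem.List.min?_eq_none_iff _ _).mp hmin
          have hzs : zs = [] := by simpa using this
          subst hzs
          show result = result ++ pvCommon (List.map (fun lp => lp.1.drop lp.2) ([] : List (List String × Nat)))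
          simp [pvCommon]
        | some m =>
          show pvAndLoop (zs.map (fun lp => if lp.1.getD lp.2 "" = m then (lp.1, lp.2 + 1) else lp)) result =
            result ++ pvCommon (zs.map (fun lp => lp.1.drop lp.2))
          have hcurne : zs.map (fun lp => lp.1.getD lp.2 "") ≠ [] := by
            intro h
            rw [h, (PySem.List.min?_eq_none_iff _ _).mpr rfl] at hmin
            exact Option.some_ne_none m hmin.symm
          have hmle : ∀ lp ∈ zs, m ≤ lp.1.getD lp.2 "" :=
            fun lp h => PySem.List.min?_isMin hmin _ (List.mem_map.mpr ⟨lp, h, rfl⟩)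
          have hfamne : ∀ l ∈ zs.map (fun lp => lp.1.drop lp.2), l ≠ [] := by
            intro l hl
            obtain ⟨lp, hlp, rfl⟩ := List.mem_map.mp hl
            exact fun hnil => by have := List.drop_eq_nil_iff.mp hnil; have := hall lp hlp; omega
          have hhead : ∀ lp ∈ zs, (lp.1.drop lp.2).headD "" = lp.1.getD lp.2 "" :=
            fun lp _ => pvDropHeadD _ _
          have hex : ∃ l ∈ zs.map (fun lp => lp.1.drop lp.2), l.headD "" ≠ m := by
            obtain ⟨c, hc, hcm⟩ := pvExistsNe _ hcurne h1 m
            obtain ⟨lp, hlp, rfl⟩ := List.mem_map.mp hc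
            exact ⟨lp.1.drop lp.2, List.mem_map.mpr ⟨lp, hlp, rfl⟩,
              by rw [hhead lp hlp]; exact hcm⟩
          have hcom : pvCommon (zs.map (fun lp => lp.1.drop lp.2)) =
              pvCommon ((zs.map (fun lp => lp.1.drop lp.2)).map
                (fun l => if l.headD "" = m then l.drop 1 else l)) :=
            pvCommon_min _ m hfamne
              (by intro l hl
                  obtain ⟨lp, hlp, rfl⟩ := List.mem_map.mp hl
                  exact hs lp hlp)
              (fun l hl => by
                obtain ⟨lp, hlp, rfl⟩ := List.mem_map.mp hl
                rw [hhead lp hlp]; exact hmle lp hlp)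
              hex
          have hfam : (zs.map (fun lp => lp.1.drop lp.2)).map
              (fun l => if l.headD "" = m then l.drop 1 else l) =
              (zs.map (fun lp => if lp.1.getD lp.2 "" = m then (lp.1, lp.2 + 1) else lp)).map
                (fun lp => lp.1.drop lp.2) := by
            rw [List.map_map, List.map_map]
            refine List.map_congr_left (fun lp hlp => ?_)
            simp only [Function.comp_def]
            rw [pvDropHeadD]
            by_cases hcc : lp.1.getD lp.2 "" = m
            · rw [if_pos hcc, if_pos hcc]; simp
            · rw [if_neg hcc, if_neg hcc]
          have hrec := IH ((zs.map (fun lp => if lp.1.getD lp.2 "" = m then (lp.1, lp.2 + 1) else lp)).map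
              (fun lp : List String × Nat => lp.1.length - lp.2)).sum
            (by rw [← hn, List.map_map]
                have hmem : ∃ lp ∈ zs, lp.1.getD lp.2 "" = m := by
                  have hmm := PySem.List.min?_mem hmin
                  obtain ⟨lp, hlp, he⟩ := List.mem_map.mp hmm
                  exact ⟨lp, hlp, he⟩
                have := pvSumLtMin zs m hall hmem
                simpa [Function.comp_def] using this)
            (zs.map (fun lp => if lp.1.getD lp.2 "" = m then (lp.1, lp.2 + 1) else lp)) result rfl
            (by intro lp hlp
                obtain ⟨lq, hlq, rfl⟩ := List.mem_map.mp hlp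
                by_cases hcc : lq.1.getD lq.2 "" = m
                · rw [if_pos hcc]
                  simp only
                  have : lq.1.drop (lq.2 + 1) = (lq.1.drop lq.2).drop 1 := by simp [List.drop_drop]
                  rw [this]
                  exact List.Pairwise.sublist (List.drop_sublist 1 _) (hs lq hlq)
                · rw [if_neg hcc]; exact hs lq hlq)
            (by intro d hd
                rw [← hfam, ← hcom] at hd
                exact hres d hd)
          rw [hrec, ← hfam, ← hcom]

-- the OR fold of unions is one big set-of-flatten
theorem pvOrGen (ls : List (List String)) (acc : PySem.Set String) :
    ls.foldl (fun result postings => PySem.Set.union result postings) acc =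
      PySem.Set.update acc ls.flatten := by
  induction ls generalizing acc with
  | nil => rfl
  | cons l ls ih =>
    rw [List.foldl_cons, ih]
    show PySem.Set.update _ _ = List.foldl _ acc (l ++ ls.flatten)
    rw [List.foldl_append]
    rfl

-- sorting a duplicate-free list gives a strictly increasing list
theorem pvSortedStrict (l : List String) (h : l.Nodup) :
    (PySem.List.sorted l (fun x => x) false).Pairwise (· < ·) := by
  have hle := PySem.List.sorted_pairwise l (fun x => x)
  have hnd : (PySem.List.sorted l (fun x => x) false).Nodup :=
    (PySem.List.sorted_perm l (fun x => x) false).nodup_iff.mpr h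
  exact (hle.and hnd).imp (fun ⟨h1, h2⟩ => lt_of_le_of_ne h1 h2)

theorem pvContains_sorted (l : List String) (d : String) :
    (PySem.List.sorted l (fun x => x) false).contains d = l.contains d := by
  by_cases h : d ∈ l <;>
    simp [PySem.List.mem_sorted, h]

-- ===== VERDICT (by name: the statement is the Claim_ definition above) =====
theorem daat_boolean_spec : Claim_equal_daat_boolean := by
  intro postings_lists operation _hdom hpre
  show daat_boolean postings_lists operation = daat_boolean_alt postings_lists operation
  unfold daat_boolean daat_boolean_alt
  by_cases hnil : postings_lists = []
  · rw [if_pos hnil, if_pos hnil]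
  rw [if_neg hnil, if_neg hnil]
  by_cases hop : operation = "AND"
  case neg =>
    rw [if_neg hop, if_neg hop]
    by_cases hor : operation = "OR"
    · rw [if_pos hor, if_pos hor]
      rw [pvOrGen]
      rfl
    · rw [if_neg hor, if_neg hor]
  case pos =>
    rw [if_pos hop, if_pos hop]
    obtain ⟨l0, rest, rfl⟩ := List.exists_cons_of_ne_nil hnil
    simp only [List.headD_cons, List.drop_one, List.tail_cons]
    set sorted_lists := (l0 :: rest).map
      (fun postings => PySem.List.sorted postings (fun x => x) false) with hsl
    have hstrict : ∀ l ∈ (l0 :: rest), (PySem.List.sorted l (fun x => x) false).Pairwise (· < ·) :=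
      fun l hl => pvSortedStrict l (hpre l hl)
    have hBfilter : (PySem.List.sorted l0 (fun x => x) false).filter
        (fun d => rest.all (fun p => p.contains d)) = pvCommon sorted_lists := by
      show _ = List.filter _ _
      rw [List.filter_congr]
      intro d _
      rw [List.all_map]
      exact (pvAllCongrMem rest _ _ (fun p _ => (pvContains_sorted p d).symm))
    have hBnodup : ((PySem.List.sorted l0 (fun x => x) false).filter
        (fun d => rest.all (fun p => p.contains d))).Nodup :=
      List.Nodup.filter _
        ((PySem.List.sorted_perm l0 (fun x => x) false).nodup_iff.mpr (hpre l0 List.mem_cons_self))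
    by_cases hguard : sorted_lists.all (fun l => !l.isEmpty)
    case pos =>
      rw [if_pos hguard]
      have hA : pvAndLoop (sorted_lists.map (fun l => (l, 0))) PySem.Set.empty =
          PySem.Set.empty ++ pvCommon ((sorted_lists.map (fun l => (l, 0))).map
            (fun lp => lp.1.drop lp.2)) := by
        refine pvAndLoop_spec _ _ ?_ ?_
        · intro lp hlp
          obtain ⟨l, hl, rfl⟩ := List.mem_map.mp hlp
          simp only [List.drop_zero]
          obtain ⟨q, hq, rfl⟩ := List.mem_map.mp hl
          exact hstrict q hq
        · intro d _
          simp [PySem.Set.empty]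
      rw [hA]
      have : (sorted_lists.map (fun l => (l, 0))).map (fun lp => lp.1.drop lp.2) = sorted_lists := by
        rw [List.map_map]
        simp [Function.comp_def]
      rw [this]
      rw [PySem.Set.ofList_eq_self_of_nodup _ (hBfilter ▸ hBnodup)]
      rw [hBfilter]
      rfl
    case neg =>
      rw [if_neg hguard]
      -- some posting set is empty: the intersection filter is empty as well
      have hex : ∃ l ∈ (l0 :: rest), l = [] := by
        by_contra hcc
        push_neg at hcc
        apply hguard
        rw [List.all_eq_true]
        intro l hl
        obtain ⟨q, hq, rfl⟩ := List.mem_map.mp hl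
        have : PySem.List.sorted q (fun x => x) false ≠ [] :=
          fun hq0 => (hcc q hq) ((PySem.List.sorted_eq_nil_iff q (fun x => x) false).mp hq0)
        simpa [List.isEmpty_iff]
      obtain ⟨le, hle, rfl⟩ := hex
      rcases List.mem_cons.mp hle with h0 | h0
      · rw [← h0]
        have : PySem.List.sorted ([] : List String) (fun x => x) false = [] :=
          (PySem.List.sorted_eq_nil_iff ([] : List String) (fun x => x) false).mpr rfl
        rw [this]
        rfl
      · have : (PySem.List.sorted l0 (fun x => x) false).filter
            (fun d => rest.all (fun p => p.contains d)) = [] := by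
          rw [List.filter_eq_nil_iff]
          intro d _ hd
          have := List.all_eq_true.mp hd [] h0
          simp at this
        rw [this]
        rfl
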